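-- pv_equiv track=rewrite | github.com/chestnutforestlabo/LaTeX_Reference_Formatter | main.py | sort_entries
-- ===== SOURCE A (Python) =====
-- from collections import defaultdict
--
-- def sort_entries(entries):
--     grouped_entries = defaultdict(list)
--     for entry in entries:
--         entry_type = entry.get('ENTRYTYPE', 'misc').lower()
--         grouped_entries[entry_type].append(entry)
--
--     # Define the desired type order
--     type_order = ['inproceedings', 'article', 'proceedings', 'book', 'misc']
--     remaining_types = sorted(set(grouped_entries.keys()) - set(type_order))
--     full_type_order = type_order + remaining_types
--
--     # Sort entries within each type by title
--     sorted_groups = {}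
--     for entry_type in full_type_order:
--         entries_of_type = grouped_entries.get(entry_type, [])
--         entries_of_type.sort(key=lambda e: e.get('title', '').lower())
--         sorted_groups[entry_type] = entries_of_type
--
--     return sorted_groups
-- ===== SOURCE B (Python) =====
-- def sort_entries(entries):
--     type_order = ['inproceedings', 'article', 'proceedings', 'book', 'misc']
--
--     def etype(e):
--         return e.get('ENTRYTYPE', 'misc').lower()
--
--     def title(e):
--         return e.get('title', '').lower()
--
--     tail = sorted({etype(e) for e in entries} - set(type_order))
--     return {t: sorted((e for e in entries if etype(e) == t), key=title)
--             for t in type_order + tail}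
-- ===== Notes on version B (the rewrite author's own statement) =====
-- stated objective: simpler
-- what changed: B drops A's mutable defaultdict grouping pass and per-group in-place sorts: it computes the non-standard type tail from a set comprehension and builds the result in one dict comprehension that filters and sorts the entries of each type.
import Mathlib
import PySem

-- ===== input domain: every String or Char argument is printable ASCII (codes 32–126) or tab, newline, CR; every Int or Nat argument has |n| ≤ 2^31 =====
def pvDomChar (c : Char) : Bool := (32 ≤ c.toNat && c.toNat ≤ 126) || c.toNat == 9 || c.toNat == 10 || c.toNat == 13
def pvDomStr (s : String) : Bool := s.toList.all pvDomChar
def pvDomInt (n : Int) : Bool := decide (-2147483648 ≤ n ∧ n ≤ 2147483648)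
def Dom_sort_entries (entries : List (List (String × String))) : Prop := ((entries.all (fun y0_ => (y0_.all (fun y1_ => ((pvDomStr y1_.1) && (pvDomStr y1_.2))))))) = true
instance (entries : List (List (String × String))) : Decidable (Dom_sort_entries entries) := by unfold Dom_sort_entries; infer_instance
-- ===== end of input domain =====

-- B replaces A's defaultdict grouping pass with a per-type filter comprehension over the
-- sorted type list (objective: simpler — no mutable grouping dict; return value only).

-- shared helpers: entry.get(k, dflt) on an assoc-list dict (first match), entry type, title sort key
def pvGet (e : List (String × String)) (k dflt : String) : String :=
  ((e.find? (fun p => p.1 == k)).map (fun p => p.2)).getD dflt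

def pvEType (e : List (String × String)) : String :=
  PySem.Str.lower (pvGet e "ENTRYTYPE" "misc")

def pvTitle (e : List (String × String)) : String :=
  PySem.Str.lower (pvGet e "title" "")

-- ===== PORT A =====
def sort_entries (entries : List (List (String × String))) : List (String × List (List (String × String))) :=
  let grouped : PySem.Dict String (List (List (String × String))) :=
    entries.foldl (fun d e => d.modify (pvEType e) [] (fun l => l ++ [e])) PySem.Dict.empty
  let type_order : List String := ["inproceedings", "article", "proceedings", "book", "misc"]
  let remaining_types : List String :=
    PySem.List.sorted (PySem.Set.diff (PySem.Set.ofList grouped.keys) (PySem.Set.ofList type_order)) (fun x => x) false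
  let full_type_order := type_order ++ remaining_types
  (full_type_order.foldl
    (fun sg t => sg.insert t (PySem.List.sorted (grouped.getD t []) pvTitle false))
    (PySem.Dict.empty : PySem.Dict String (List (List (String × String))))).items

-- ===== PORT B =====
def sort_entries_alt (entries : List (List (String × String))) : List (String × List (List (String × String))) :=
  let type_order : List String := ["inproceedings", "article", "proceedings", "book", "misc"]
  let tail : List String :=
    PySem.List.sorted (PySem.Set.diff (PySem.Set.ofList (entries.map pvEType)) (PySem.Set.ofList type_order)) (fun x => x) false
  (type_order ++ tail).map
    (fun t => (t, PySem.List.sorted (entries.filter (fun e => pvEType e == t)) pvTitle false))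

-- ===== PRECONDITION & SPEC =====
def Spec_sort_entries (entries : List (List (String × String))) (out : List (String × List (List (String × String)))) : Prop := out = sort_entries_alt entries
instance (entries : List (List (String × String))) (out : List (String × List (List (String × String)))) : Decidable (Spec_sort_entries entries out) := by unfold Spec_sort_entries; infer_instance

-- ===== CLAIM (what is proved, stated in full; the proofs are below) =====
def Claim_equal_sort_entries : Prop := ∀ (entries : List (List (String × String))), Dom_sort_entries entries → Spec_sort_entries entries (sort_entries entries)

-- ===== LEMMAS AND PROOFS =====

-- the grouping fold's lookup at t is exactly the filter of entries of type t
theorem grouped_getD (entries : List (List (String × String))) (t : String) :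
    (entries.foldl (fun d e => d.modify (pvEType e) [] (fun l => l ++ [e]))
        (PySem.Dict.empty : PySem.Dict String (List (List (String × String))))).getD t []
      = entries.filter (fun e => pvEType e == t) := by
  have h := PySem.Dict.getD_foldl_modify_append
    (l := entries.map (fun e => (pvEType e, e)))
    (d := (PySem.Dict.empty : PySem.Dict String (List (List (String × String))))) (c := t)
  rw [List.foldl_map] at h
  simpa [List.filter_map, Function.comp_def, List.map_id'] using h

-- the grouping fold's keys are the distinct entry types in first-occurrence order
theorem grouped_keys (entries : List (List (String × String))) :
    (entries.foldl (fun d e => d.modify (pvEType e) [] (fun l => l ++ [e]))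
        (PySem.Dict.empty : PySem.Dict String (List (List (String × String))))).keys
      = PySem.Set.ofList (entries.map pvEType) := by
  have h := PySem.Dict.keys_foldl_modify_key (l := entries) (key := pvEType)
    (d0 := ([] : List (List (String × String)))) (f := fun _ e => fun l => l ++ [e])
    (d := (PySem.Dict.empty : PySem.Dict String (List (List (String × String)))))
  simpa [PySem.Set.ofList_eq_foldl, PySem.Set.update, PySem.Dict.keys_empty] using h

-- ===== VERDICT (by name: the statement is the Claim_ definition above) =====
theorem sort_entries_spec : Claim_equal_sort_entries := by
  intro entries _
  show sort_entries entries = sort_entries_alt entries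
  simp only [sort_entries, sort_entries_alt]
  rw [grouped_keys,
      PySem.Set.ofList_eq_self_of_nodup _ (PySem.Set.nodup_ofList (entries.map pvEType))]
  set type_order : List String := ["inproceedings", "article", "proceedings", "book", "misc"] with hto
  set tail : List String :=
    PySem.List.sorted (PySem.Set.diff (PySem.Set.ofList (entries.map pvEType)) (PySem.Set.ofList type_order)) (fun x => x) false with htail
  have htailmem : ∀ x ∈ tail, x ∈ PySem.Set.diff (PySem.Set.ofList (entries.map pvEType)) (PySem.Set.ofList type_order) := by
    intro x hx
    exact (PySem.List.mem_sorted _ _ _ x).mp hx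
  have hfullnd : (type_order ++ tail).Nodup := by
    refine List.nodup_append.mpr ⟨by decide, ?_, ?_⟩
    · exact ((PySem.List.sorted_perm _ _ _).nodup_iff).mpr
        (PySem.Set.nodup_diff _ _ (PySem.Set.nodup_ofList _))
    · intro a ha b hb heq
      subst heq
      have := (PySem.Set.mem_diff _ _ a).mp (htailmem a hb)
      exact this.2 (by simpa [hto, PySem.Set.ofList] using ha)
  have hfresh := PySem.Dict.items_foldl_insert_fresh
    (l := type_order ++ tail) (k := fun t => t)
    (v := fun t => PySem.List.sorted ((entries.foldl (fun d e => d.modify (pvEType e) [] (fun l => l ++ [e]))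
        (PySem.Dict.empty : PySem.Dict String (List (List (String × String))))).getD t []) pvTitle false)
    (d := PySem.Dict.empty)
    (by intro a _; exact PySem.Dict.contains_empty a)
    (by simpa using hfullnd)
  rw [hfresh]
  have hemp : (PySem.Dict.empty : PySem.Dict String (List (List (String × String)))).items = [] := rfl
  simp only [hemp, List.nil_append]
  apply List.map_congr_left
  intro t _
  rw [grouped_getD]
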